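-- pv_equiv track=rewrite | github.com/d-faktor/tasks-solutions | Strings/MaxSubString.py | find_max_substring_index
-- ===== SOURCE A (Python) =====
-- def find_max_substring_index(input_string):
--     max_length = 0
--     current_length = 1
--     max_index = 0
--     current_index = 0
--     for i in range(1, len(input_string)):
--         if input_string[i] != input_string[i - 1]:
--             current_index = i
--             current_length = 0
--         current_length += 1
--         if max_length < current_length:
--             max_length = current_length
--             max_index = current_index
--     return max_index
-- ===== SOURCE B (Python) =====
-- def find_max_substring_index(input_string):
--     n = len(input_string)
--     # pass 1: starts[i] = start index of the maximal run of equal characters containing position i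
--     starts = [0]
--     for i in range(1, n):
--         starts.append(starts[-1] if input_string[i] == input_string[i - 1] else i)
--     # pass 2: over positions 1..n-1, pick the first position whose streak length strictly beats the best
--     best_len = 0
--     best_idx = 0
--     for i in range(1, n):
--         length = i - starts[i] + 1
--         if length > best_len:
--             best_len = length
--             best_idx = starts[i]
--     return best_idx
-- ===== Notes on version B (the rewrite author's own statement) =====
-- stated objective: alternative
-- what changed: Replaces A's single-pass state machine (four running variables updated per character) with two passes: a first pass precomputes a table of run-start indices, and a second pass selects the best position purely arithmetically from that table, with no character comparisons.
import Mathlib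
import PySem

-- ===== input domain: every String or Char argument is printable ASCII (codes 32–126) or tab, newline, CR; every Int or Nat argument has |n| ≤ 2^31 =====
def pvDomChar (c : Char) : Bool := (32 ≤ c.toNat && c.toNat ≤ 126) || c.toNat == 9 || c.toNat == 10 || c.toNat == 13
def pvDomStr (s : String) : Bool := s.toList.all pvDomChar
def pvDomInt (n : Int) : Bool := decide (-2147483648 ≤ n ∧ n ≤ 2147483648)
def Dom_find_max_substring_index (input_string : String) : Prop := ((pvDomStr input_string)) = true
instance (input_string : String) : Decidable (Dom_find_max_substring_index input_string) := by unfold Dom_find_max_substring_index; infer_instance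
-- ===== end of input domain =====

-- B replaces A's one-pass four-variable state machine with two passes (a precomputed run-start table, then an
-- arithmetic selection scan); same O(n) cost, same value on every input.

-- ===== PORT A =====
-- 'for i in range(1, len(input_string))' ported as index recursion from 1; input_string[i] with the
-- in-range index i (0 ≤ i-1 < i < len) ported as List.getD, which is exact there.
def aLoop (l : List Char) (maxL curL maxI curI : Int) (i : Nat) : Int :=
  if h : i < l.length then
    let curI2 : Int := if l.getD i ' ' ≠ l.getD (i - 1) ' ' then (i : Int) else curI
    let curL2 : Int := (if l.getD i ' ' ≠ l.getD (i - 1) ' ' then 0 else curL) + 1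
    let maxL2 : Int := if maxL < curL2 then curL2 else maxL
    let maxI2 : Int := if maxL < curL2 then curI2 else maxI
    aLoop l maxL2 curL2 maxI2 curI2 (i + 1)
  else maxI
termination_by l.length - i
decreasing_by omega

def find_max_substring_index (input_string : String) : Int :=
  aLoop input_string.toList 0 1 0 0 1

-- ===== PORT B =====
-- pass 1 of Source B: starts.append(starts[-1] if s[i] == s[i-1] else i); starts[-1] on the always-nonempty
-- accumulator is ported as getLastD, which is exact there
def bStarts (l : List Char) (starts : List Int) (i : Nat) : List Int :=
  if h : i < l.length then
    bStarts l (starts ++ [if l.getD i ' ' = l.getD (i - 1) ' ' then starts.getLastD 0 else (i : Int)]) (i + 1)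
  else starts
termination_by l.length - i
decreasing_by omega

-- pass 2 of Source B: length = i - starts[i] + 1; in-range starts[i] ported as List.getD, exact there
def bLoop (l : List Char) (starts : List Int) (bestLen bestIdx : Int) (i : Nat) : Int :=
  if h : i < l.length then
    let length : Int := (i : Int) - starts.getD i 0 + 1
    bLoop l starts (if length > bestLen then length else bestLen)
      (if length > bestLen then starts.getD i 0 else bestIdx) (i + 1)
  else bestIdx
termination_by l.length - i
decreasing_by omega

def find_max_substring_index_alt (input_string : String) : Int :=
  bLoop input_string.toList (bStarts input_string.toList [0] 1) 0 0 1

-- ===== PRECONDITION & SPEC =====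
def Spec_find_max_substring_index (input_string : String) (out : Int) : Prop := out = find_max_substring_index_alt input_string
instance (input_string : String) (out : Int) : Decidable (Spec_find_max_substring_index input_string out) := by unfold Spec_find_max_substring_index; infer_instance

-- ===== CLAIM (what is proved, stated in full; the proofs are below) =====
def Claim_equal_find_max_substring_index : Prop := ∀ (input_string : String), Dom_find_max_substring_index input_string → Spec_find_max_substring_index input_string (find_max_substring_index input_string)

-- ===== LEMMAS AND PROOFS =====

-- the run-start of the position i, as a recurrence
def startF (l : List Char) : Nat → Int
  | 0 => 0
  | (j + 1) => if l.getD (j + 1) ' ' = l.getD j ' ' then startF l j else ((j + 1 : Nat) : Int)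

lemma getLastD_eq_getD_length_sub_one (acc : List Int) (h : acc ≠ []) :
    acc.getLastD 0 = acc.getD (acc.length - 1) 0 := by
  cases acc with
  | nil => simp at h
  | cons a as =>
    rw [List.getLastD_eq_getLast?, List.getLast?_eq_getElem?, List.getD_eq_getElem?_getD]

lemma bStarts_getD (l : List Char) :
    ∀ (fuel i : Nat) (acc : List Int), l.length ≤ i + fuel → 1 ≤ i → acc.length = i →
      (∀ j, j < i → acc.getD j 0 = startF l j) →
      ∀ j, j < l.length ∨ j < i → (bStarts l acc i).getD j 0 = startF l j := by
  intro fuel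
  induction fuel with
  | zero =>
    intro i acc hle h1 hlen hacc j hj
    rw [bStarts, dif_neg (by omega)]
    exact hacc j (by omega)
  | succ n ih =>
    intro i acc hle h1 hlen hacc j hj
    by_cases h : i < l.length
    · rw [bStarts, dif_pos h]
      have hx : (if l.getD i ' ' = l.getD (i - 1) ' ' then acc.getLastD 0 else (i : Int))
          = startF l i := by
        have hne : acc ≠ [] := by intro he; rw [he] at hlen; simp at hlen; omega
        have hlast : acc.getLastD 0 = startF l (i - 1) := by
          rw [getLastD_eq_getD_length_sub_one acc hne, hlen]
          exact hacc (i - 1) (by omega)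
        cases i with
        | zero => omega
        | succ k =>
          rw [hlast]
          simp only [Nat.add_sub_cancel, startF]
      refine ih (i + 1) _ (by omega) (by omega) (by simp [hlen]) ?_ j (hj.elim Or.inl (fun hji => Or.inr (by omega)))
      intro k hk
      by_cases hki : k < i
      · rw [List.getD_append _ _ _ _ (by omega)]
        exact hacc k hki
      · have hk' : k = i := by omega
        subst hk'
        rw [List.getD_eq_getElem?_getD, List.getElem?_append_right (by omega)]
        simp only [hlen, Nat.sub_self, List.getElem?_cons_zero, Option.getD_some]
        simpa using hx
    · rw [bStarts, dif_neg h]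
      exact hacc j (by omega)

lemma aLoop_eq_bLoop (l : List Char) (S : List Int)
    (hS : ∀ j, j < l.length → S.getD j 0 = startF l j) :
    ∀ (fuel i : Nat), l.length ≤ i + fuel → 1 ≤ i → ∀ (B I : Int),
      aLoop l B (((i - 1 : Nat) : Int) - startF l (i - 1) + 1) I (startF l (i - 1)) i =
        bLoop l S B I i := by
  intro fuel
  induction fuel with
  | zero =>
    intro i hle h1 B I
    rw [aLoop, dif_neg (by omega), bLoop, dif_neg (by omega)]
  | succ n ih =>
    intro i hle h1 B I
    by_cases h : i < l.length
    · rw [aLoop, dif_pos h, bLoop, dif_pos h]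
      have hSi : S.getD i 0 = startF l i := hS i h
      have hstep : startF l i
          = if l.getD i ' ' = l.getD (i - 1) ' ' then startF l (i - 1) else (i : Int) := by
        cases i with
        | zero => omega
        | succ k => simp only [Nat.add_sub_cancel, startF]
      have hcast : ((i - 1 : Nat) : Int) = (i : Int) - 1 := by omega
      by_cases hc : l.getD i ' ' = l.getD (i - 1) ' '
      · have hstep' : startF l i = startF l (i - 1) := by rw [hstep, if_pos hc]
        have hSval : S.getD i 0 = startF l (i - 1) := by rw [hSi, hstep']
        simp only [ne_eq, hc, not_true_eq_false, if_false, hSval, gt_iff_lt]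
        have e : ((i - 1 : Nat) : Int) - startF l (i - 1) + 1 + 1
            = (i : Int) - startF l (i - 1) + 1 := by omega
        rw [e]
        have := ih (i + 1) (by omega) (by omega)
          (if B < (i : Int) - startF l (i - 1) + 1 then (i : Int) - startF l (i - 1) + 1 else B)
          (if B < (i : Int) - startF l (i - 1) + 1 then startF l (i - 1) else I)
        simp only [Nat.add_sub_cancel, hstep'] at this
        exact this
      · have hstep' : startF l i = (i : Int) := by rw [hstep, if_neg hc]
        have hSval : S.getD i 0 = (i : Int) := by rw [hSi, hstep']
        simp only [ne_eq, hc, not_false_eq_true, if_true, hSval, gt_iff_lt, zero_add]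
        rw [show (i : Int) - (i : Int) + 1 = 1 from by omega]
        have := ih (i + 1) (by omega) (by omega)
          (if B < 1 then 1 else B) (if B < 1 then (i : Int) else I)
        simp only [Nat.add_sub_cancel, hstep'] at this
        rw [show (i : Int) - (i : Int) + 1 = 1 from by omega] at this
        exact this
    · rw [aLoop, dif_neg h, bLoop, dif_neg h]

-- ===== VERDICT (by name: the statement is the Claim_ definition above) =====
theorem find_max_substring_index_spec : Claim_equal_find_max_substring_index := by
  intro s _
  show aLoop s.toList 0 1 0 0 1 = bLoop s.toList (bStarts s.toList [0] 1) 0 0 1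
  have hS : ∀ j, j < s.toList.length →
      (bStarts s.toList [0] 1).getD j 0 = startF s.toList j := by
    intro j hj
    refine bStarts_getD s.toList s.toList.length 1 [0] (by omega) (by omega) rfl ?_ j (Or.inl hj)
    intro k hk
    have : k = 0 := by omega
    subst this
    rfl
  have key := aLoop_eq_bLoop s.toList (bStarts s.toList [0] 1) hS s.toList.length 1
    (by omega) (by omega) 0 0
  simpa [startF] using key
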